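-- pv_equiv track=rewrite | github.com/lawliet19189/gritlm | rag/passage_encoder.py | custom_jsonl_transformer
-- ===== SOURCE A (Python) =====
-- def custom_jsonl_transformer(item):
--     if 'title' in item and 'section' in item and 'text' in item:
--         item['text'] = f"{item['title']}: {item['section']}\n{item['text']}"
--     elif 'title' in item and 'section' in item:
--         item['text'] = f"{item['title']}: {item['section']}"
--     elif 'title' in item and 'text' in item:
--         item['text'] = f"{item['title']}\n{item['text']}"
--     elif 'section' in item and 'text' in item:
--         item['text'] = f"{item['section']}\n{item['text']}"
--     elif 'title' in item:
--         item['text'] = item['title']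
--     elif 'section' in item:
--         item['text'] = item['section']
--     else:
--         item['text'] = item.get('text', '')
--
--     # Remove other keys
--     keys_to_remove = [key for key in item if key != 'text']
--     for key in keys_to_remove:
--         del item[key]
--
--     return item
-- ===== SOURCE B (Python) =====
-- def custom_jsonl_transformer(item):
--     head = ": ".join(item[k] for k in ('title', 'section') if k in item)
--     parts = ([head] if 'title' in item or 'section' in item else []) \
--             + ([item['text']] if 'text' in item else [])
--     value = "\n".join(parts)
--     item.clear()
--     item['text'] = value
--     return item
-- ===== Notes on version B (the rewrite author's own statement) =====
-- stated objective: idiomatic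
-- what changed: Instead of a seven-branch if/elif chain plus a key-collection pass and a deletion loop, B is data-driven: it joins the present title/section values with ': ', joins that header (when one exists) with the text value using '\n', and replaces the dict contents with clear() plus one assignment.
import Mathlib
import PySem

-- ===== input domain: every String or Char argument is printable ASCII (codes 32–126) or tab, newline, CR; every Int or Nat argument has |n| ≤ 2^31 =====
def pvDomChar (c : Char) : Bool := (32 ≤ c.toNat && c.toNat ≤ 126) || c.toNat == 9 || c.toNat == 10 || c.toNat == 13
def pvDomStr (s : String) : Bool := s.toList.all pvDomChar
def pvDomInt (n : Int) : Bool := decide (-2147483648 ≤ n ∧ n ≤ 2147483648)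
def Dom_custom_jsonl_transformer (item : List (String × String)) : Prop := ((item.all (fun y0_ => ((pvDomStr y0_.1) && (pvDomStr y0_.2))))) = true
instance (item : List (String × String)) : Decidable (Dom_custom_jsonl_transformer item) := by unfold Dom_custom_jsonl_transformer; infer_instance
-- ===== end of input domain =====

-- B replaces A's seven-branch if/elif chain and deletion loop by joins over filtered key
-- lists (data-driven, no case analysis) followed by clear-and-assign; same return value
-- and the same in-place mutation (the dict ends up holding only 'text' in both).

-- ===== PORT A =====
-- item['k'] under 'k' in item is exact as getD with any default; f-strings on strings concatenate.
def custom_jsonl_transformer (item : List (String × String)) : List (String × String) :=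
  let d := PySem.Dict.ofList item
  let d' :=
    if d.contains "title" && d.contains "section" && d.contains "text" then
      d.insert "text" (d.getD "title" "" ++ ": " ++ d.getD "section" "" ++ "\n" ++ d.getD "text" "")
    else if d.contains "title" && d.contains "section" then
      d.insert "text" (d.getD "title" "" ++ ": " ++ d.getD "section" "")
    else if d.contains "title" && d.contains "text" then
      d.insert "text" (d.getD "title" "" ++ "\n" ++ d.getD "text" "")
    else if d.contains "section" && d.contains "text" then
      d.insert "text" (d.getD "section" "" ++ "\n" ++ d.getD "text" "")
    else if d.contains "title" then
      d.insert "text" (d.getD "title" "")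
    else if d.contains "section" then
      d.insert "text" (d.getD "section" "")
    else
      d.insert "text" (d.getD "text" "")   -- item['text'] = item.get('text', '')
  let keysToRemove := d'.keys.filter (fun k => decide (k ≠ "text"))
  (keysToRemove.foldl PySem.Dict.erase d').items

-- ===== PORT B =====
def custom_jsonl_transformer_alt (item : List (String × String)) : List (String × String) :=
  let d := PySem.Dict.ofList item
  -- head = ": ".join(item[k] for k in ('title','section') if k in item)
  let head := String.intercalate ": "
      ((["title", "section"].filter (fun k => d.contains k)).map (fun k => d.getD k ""))
  -- parts = ([head] if 'title' in item or 'section' in item else []) + ([item['text']] if 'text' in item else [])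
  let parts :=
    (if d.contains "title" || d.contains "section" then [head] else []) ++
    (if d.contains "text" then [d.getD "text" ""] else [])
  -- item.clear(); item['text'] = "\n".join(parts)
  [("text", String.intercalate "\n" parts)]

-- ===== PRECONDITION & SPEC =====
def Spec_custom_jsonl_transformer (item : List (String × String)) (out : List (String × String)) : Prop := out = custom_jsonl_transformer_alt item
instance (item : List (String × String)) (out : List (String × String)) : Decidable (Spec_custom_jsonl_transformer item out) := by unfold Spec_custom_jsonl_transformer; infer_instance

-- ===== CLAIM (what is proved, stated in full; the proofs are below) =====
def Claim_equal_custom_jsonl_transformer : Prop := ∀ (item : List (String × String)), Dom_custom_jsonl_transformer item → Spec_custom_jsonl_transformer item (custom_jsonl_transformer item)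

-- ===== LEMMAS AND PROOFS =====

-- folding erase over a list of keys filters the items down to keys outside that list
lemma foldl_erase_items (ks : List String) (d : PySem.Dict String String) :
    (ks.foldl PySem.Dict.erase d).items = d.items.filter (fun p => decide (p.1 ∉ ks)) := by
  induction ks generalizing d with
  | nil => simp
  | cons k ks ih =>
    rw [List.foldl_cons, ih]
    show (PySem.Dict.erase d k).items.filter _ = _
    simp only [PySem.Dict.erase, List.filter_filter]
    apply List.filter_congr
    intro p _
    by_cases h1 : p.1 = k <;> by_cases h2 : p.1 ∈ ks <;> simp [h1, h2]

-- with nodup keys, filtering the items to one present key leaves exactly its pair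
lemma filter_items_eq_singleton (l : List (String × String)) (k : String) (v : String)
    (hnd : (l.map Prod.fst).Nodup) (hmem : (k, v) ∈ l) :
    l.filter (fun p => decide (p.1 = k)) = [(k, v)] := by
  induction l with
  | nil => cases hmem
  | cons p l ih =>
    simp only [List.map_cons, List.nodup_cons] at hnd
    rcases List.mem_cons.mp hmem with h | h
    · subst h
      simp only [List.filter_cons, decide_eq_true_eq]
      rw [if_pos trivial]
      have hnil : List.filter (fun p => decide (p.1 = k)) l = [] := by
        apply List.filter_eq_nil_iff.mpr
        intro q hq
        simp only [decide_eq_true_eq]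
        intro hqk
        have hqmem : q.1 ∈ l.map Prod.fst := List.mem_map_of_mem (f := Prod.fst) hq
        exact hnd.1 (hqk ▸ hqmem)
      rw [hnil]
    · have hpk : p.1 ≠ k := by
        intro hpk
        have hmem2 : k ∈ l.map Prod.fst := List.mem_map_of_mem (f := Prod.fst) h
        exact hnd.1 (hpk ▸ hmem2)
      simp only [List.filter_cons, decide_eq_true_eq, if_neg hpk]
      exact ih hnd.2 h

-- A's removal loop on (d.insert "text" v) leaves exactly [("text", v)]
lemma clean_insert (d : PySem.Dict String String) (hnd : d.keys.Nodup) (v : String) :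
    (((d.insert "text" v).keys.filter (fun k => decide (k ≠ "text"))).foldl
        PySem.Dict.erase (d.insert "text" v)).items = [("text", v)] := by
  set e := d.insert "text" v with he
  have hnde : e.keys.Nodup := PySem.Dict.nodup_keys_insert d "text" v hnd
  have hget : e.get? "text" = some v := PySem.Dict.get?_insert_self d "text" v
  have hmem : ("text", v) ∈ e.items :=
    PySem.Dict.mem_items_of_get?_eq_some e hget
  rw [foldl_erase_items]
  have hcongr : e.items.filter (fun p => decide (p.1 ∉ e.keys.filter (fun k => decide (k ≠ "text"))))
      = e.items.filter (fun p => decide (p.1 = "text")) := by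
    apply List.filter_congr
    intro p hp
    have hpk : p.1 ∈ e.keys := PySem.Dict.mem_keys_of_mem_items e hp
    by_cases h : p.1 = "text" <;> simp [List.mem_filter, h, hpk]
  rw [hcongr]
  exact filter_items_eq_singleton e.items "text" v hnde hmem

-- ===== VERDICT (by name: the statement is the Claim_ definition above) =====
theorem custom_jsonl_transformer_spec : Claim_equal_custom_jsonl_transformer := by
  intro item _
  unfold Spec_custom_jsonl_transformer custom_jsonl_transformer custom_jsonl_transformer_alt
  have hnd : (PySem.Dict.ofList item).keys.Nodup := PySem.Dict.nodup_keys_ofList item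
  set d := PySem.Dict.ofList item with hd
  cases hT : d.contains "title" <;> cases hS : d.contains "section" <;> cases hX : d.contains "text" <;>
    simp only [hT, hS, hX, Bool.and_true, Bool.and_false, Bool.or_true, Bool.or_false,
      Bool.true_or, Bool.false_or, if_true, if_false, Bool.false_eq_true, clean_insert d hnd,
      List.filter_cons, List.filter_nil, decide_true, decide_false, List.map_cons, List.map_nil,
      String.intercalate, List.intercalate, List.intersperse, List.append_nil, List.nil_append] <;>
    first
      | rfl
      | rw [PySem.Dict.getD_of_not_contains d "" hX]
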